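-- pv_equiv track=rewrite | github.com/choderalab/missense-kinase-toolkit | missense_kinase_toolkit/databases/missense_kinase_toolkit/databases/kinase_schema.py | replace_none_with_max_len
-- ===== SOURCE A (Python) =====
-- def get_sequence_max_with_exception(list_in: list[int| None]) -> int:
--     """Get maximum sequence length from dictionary of dictionaries.
--
--     Parameters
--     ----------
--     dict_in : dict[str, dict[str, str | None]]
--         Dictionary of dictionaries.
--
--     Returns
--     -------
--     int
--         Maximum sequence length.
--     """
--     try:
--         return max(list_in)
--     except ValueError:
--         return 0
--
-- def replace_none_with_max_len(dict_in):
--     dict_max_len = {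
--         key1: get_sequence_max_with_exception([len(val2) for val2 in val1.values() if val2 is not None])
--         for key1, val1 in dict_in.items()
--     }
--
--     for region, length in dict_max_len.items():
--         for hgnc, seq in dict_in[region].items():
--             if seq is None:
--                 dict_in[region][hgnc] = "-" * length
--
--     return dict_in
-- ===== SOURCE B (Python) =====
-- def replace_none_with_max_len(dict_in):
--     for region in dict_in.values():
--         dash = ""
--         none_keys = []
--         for hgnc, seq in region.items():
--             if seq is None:
--                 region[hgnc] = dash
--                 none_keys.append(hgnc)
--             elif len(seq) > len(dash):
--                 dash = "-" * len(seq)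
--                 for key in none_keys:
--                     region[key] = dash
--     return dict_in
-- ===== Notes on version B (the rewrite author's own statement) =====
-- stated objective: alternative
-- what changed: Replaces A's two-phase precompute-the-max-then-fill with an online single pass per region: it streams the entries once, filling each None with the best dash string seen so far and retroactively repairing the already-filled keys whenever a longer value appears, so no max is ever precomputed.
import Mathlib
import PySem

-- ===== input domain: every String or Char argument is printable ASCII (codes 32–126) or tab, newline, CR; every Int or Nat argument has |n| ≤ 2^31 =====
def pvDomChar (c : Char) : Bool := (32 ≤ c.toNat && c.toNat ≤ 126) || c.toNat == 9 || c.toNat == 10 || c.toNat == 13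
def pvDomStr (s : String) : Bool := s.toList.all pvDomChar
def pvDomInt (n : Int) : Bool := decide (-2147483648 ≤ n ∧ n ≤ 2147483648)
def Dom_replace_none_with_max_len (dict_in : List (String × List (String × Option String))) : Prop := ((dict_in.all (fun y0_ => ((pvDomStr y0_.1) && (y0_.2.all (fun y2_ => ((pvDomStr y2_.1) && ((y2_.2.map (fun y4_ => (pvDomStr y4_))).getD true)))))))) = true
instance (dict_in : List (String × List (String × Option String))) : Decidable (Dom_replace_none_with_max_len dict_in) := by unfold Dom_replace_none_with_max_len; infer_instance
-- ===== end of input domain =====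

-- B replaces A's precompute-the-max-then-fill with one online pass per region: each None is
-- filled with the best dash string seen so far and the already-filled keys are retroactively
-- repaired whenever a longer value appears (objective: alternative; no max is precomputed).
-- Equivalence is about the RETURN value; both Pythons mutate dict_in in place identically.
-- ===== PORT A =====
-- port of get_sequence_max_with_exception: max(list) with try/except ValueError -> 0
def pvSeqMax (list_in : List Int) : Int :=
  match PySem.List.max? list_in (fun x => x) with
  | some m => m
  | none => 0

-- d[region][hgnc] = "-" * length : overwrite hgnc in the inner dict stored at region
def pvAssign (d : PySem.Dict String (PySem.Dict String (Option String)))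
    (region hgnc : String) (length : Int) :
    PySem.Dict String (PySem.Dict String (Option String)) :=
  d.insert region ((d.getD region PySem.Dict.empty).insert hgnc
    (some (String.mk (PySem.List.pyRepeat ['-'] length))))

def replace_none_with_max_len (dict_in : List (String × List (String × Option String))) : List (String × List (String × Option String)) :=
  -- dict_in as the dict of dicts it denotes
  let d0 : PySem.Dict String (PySem.Dict String (Option String)) :=
    PySem.Dict.mk (dict_in.map (fun p => (p.1, PySem.Dict.mk p.2)))
  -- dict_max_len = {key1: helper([len(val2) for val2 in val1.values() if val2 is not None]) ...}
  let dict_max_len : PySem.Dict String Int :=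
    d0.items.foldl (fun acc p =>
      acc.insert p.1 (pvSeqMax (p.2.values.filterMap (fun v => v.map PySem.Str.len))))
      PySem.Dict.empty
  -- for region, length in dict_max_len.items(): for hgnc, seq in dict_in[region].items(): ...
  let final : PySem.Dict String (PySem.Dict String (Option String)) :=
    dict_max_len.items.foldl (fun d rl =>
      (d.getD rl.1 PySem.Dict.empty).items.foldl (fun d hs =>
        match hs.2 with
        | none => pvAssign d rl.1 hs.1 rl.2
        | some _ => d) d) d0
  final.items.map (fun p => (p.1, p.2.items))

-- ===== PORT B =====
-- one step of B's inner loop: state = (region dict, current dash string, None keys seen)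
def pvStep (st : PySem.Dict String (Option String) × String × List String)
    (kv : String × Option String) :
    PySem.Dict String (Option String) × String × List String :=
  match kv.2 with
  | none => (st.1.insert kv.1 (some st.2.1), st.2.1, st.2.2 ++ [kv.1])
  | some seq =>
    if PySem.Str.len st.2.1 < PySem.Str.len seq then   -- len(seq) > len(dash)
      let dash := String.mk (PySem.List.pyRepeat ['-'] (PySem.Str.len seq))  -- "-" * len(seq)
      (st.2.2.foldl (fun r key => r.insert key (some dash)) st.1, dash, st.2.2)
    else st

def pvRegionFill (items : List (String × Option String)) : List (String × Option String) :=
  (items.foldl pvStep (PySem.Dict.mk items, "", ([] : List String))).1.items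

def replace_none_with_max_len_alt (dict_in : List (String × List (String × Option String))) : List (String × List (String × Option String)) :=
  dict_in.map (fun p => (p.1, pvRegionFill p.2))

-- ===== PRECONDITION & SPEC =====
-- Pre_ excludes association lists with duplicate outer-region keys or duplicate keys inside a
-- region: such lists do not represent a Python dict (A's input type), so A never sees them.
def Pre_replace_none_with_max_len (dict_in : List (String × List (String × Option String))) : Prop :=
  (dict_in.map (fun p => p.1)).Nodup ∧ ∀ p ∈ dict_in, (p.2.map (fun q => q.1)).Nodup
instance (dict_in : List (String × List (String × Option String))) : Decidable (Pre_replace_none_with_max_len dict_in) := by unfold Pre_replace_none_with_max_len; infer_instance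

def pvWitness_replace_none_with_max_len : (List (String × List (String × Option String))) :=
  [("a", [("x", none), ("y", some "ab")]), ("b", [])]

def Spec_replace_none_with_max_len (dict_in : List (String × List (String × Option String))) (out : List (String × List (String × Option String))) : Prop := out = replace_none_with_max_len_alt dict_in
instance (dict_in : List (String × List (String × Option String))) (out : List (String × List (String × Option String))) : Decidable (Spec_replace_none_with_max_len dict_in out) := by unfold Spec_replace_none_with_max_len; infer_instance

-- ===== CLAIM (what is proved, stated in full; the proofs are below) =====
def Claim_equal_replace_none_with_max_len : Prop := ∀ (dict_in : List (String × List (String × Option String))), Dom_replace_none_with_max_len dict_in → Pre_replace_none_with_max_len dict_in → Spec_replace_none_with_max_len dict_in (replace_none_with_max_len dict_in)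

-- ===== LEMMAS AND PROOFS =====

-- proof-only abbreviations: the replacement value, the per-entry replacement, the max length,
-- and the keys of the None entries of a prefix
def pvDash (m : Int) : Option String := some (String.mk (PySem.List.pyRepeat ['-'] m))

def pvRepl (m : Int) (q : String × Option String) : String × Option String :=
  (q.1, match q.2 with | none => pvDash m | some s => some s)

def pvM (l : List (String × Option String)) : Int :=
  pvSeqMax ((l.map (fun q => q.2)).filterMap (fun v => v.map PySem.Str.len))

def pvNoneKeys (l : List (String × Option String)) : List String :=
  l.filterMap (fun q => match q.2 with | none => some q.1 | some _ => none)

-- substituting the value at the unique occurrence of a key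
theorem pv_map_subst {ν : Type} (l₁ l₂ : List (String × ν)) (k : String) (v old : ν)
    (h : ((l₁ ++ (k, old) :: l₂).map (fun p => p.1)).Nodup) :
    (l₁ ++ (k, old) :: l₂).map (fun p => if (p.1 == k) = true then (k, v) else p)
      = l₁ ++ (k, v) :: l₂ := by
  simp only [List.map_append, List.map_cons] at h
  have h1 : ∀ p ∈ l₁, p.1 ≠ k := by
    intro p hp hk
    have := (List.nodup_append.mp h).2.2
    exact this p.1 (List.mem_map_of_mem hp) k (by simp) hk
  have h2 : ∀ p ∈ l₂, p.1 ≠ k := by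
    intro p hp hk
    have := ((List.nodup_append.mp h).2.1)
    rw [List.nodup_cons] at this
    exact this.1 (hk ▸ List.mem_map_of_mem hp)
  rw [List.map_append, List.map_cons]
  congr 1
  · calc l₁.map (fun p => if (p.1 == k) = true then (k, v) else p)
        = l₁.map (fun a => a) := List.map_congr_left (fun p hp => by simp [h1 p hp])
      _ = l₁ := List.map_id' l₁
  · congr 1
    · simp
    · calc l₂.map (fun p => if (p.1 == k) = true then (k, v) else p)
          = l₂.map (fun a => a) := List.map_congr_left (fun p hp => by simp [h2 p hp])
        _ = l₂ := List.map_id' l₂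

theorem pv_insert_eq_self {ν : Type} (d : PySem.Dict String ν) (k : String) (v : ν)
    (hnd : d.keys.Nodup) (h : d.get? k = some v) : d.insert k v = d := by
  have hc : d.contains k = true := by
    rw [PySem.Dict.contains_eq_isSome_get?, h]; rfl
  apply PySem.Dict.ext
  rw [PySem.Dict.items_insert_of_contains d v hc]
  calc d.items.map (fun p => if (p.1 == k) = true then (k, v) else p)
      = d.items.map (fun a => a) := by
        refine List.map_congr_left (fun p hp => ?_)
        by_cases hk : (p.1 == k) = true
        · have hk' : p.1 = k := by simpa using hk
          have hv := PySem.Dict.get?_of_mem_items d hp hnd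
          rw [hk', h] at hv
          have hv' : v = p.2 := by simpa using hv
          simp [← hk', hv']
        · simp [hk]
    _ = d.items := List.map_id' d.items

-- the inner Python loop of A over one region: one overwrite per None entry
theorem pv_innerLoop (r : String) (m : Int) :
    ∀ (suf : List (String × Option String)) (d : PySem.Dict String (PySem.Dict String (Option String)))
      (j : PySem.Dict String (Option String)) (pre : List (String × Option String)),
    d.keys.Nodup → d.get? r = some j → j.items = pre ++ suf →
    ((pre ++ suf).map (fun q => q.1)).Nodup →
    suf.foldl (fun d hs => match hs.2 with | none => pvAssign d r hs.1 m | some _ => d) d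
      = d.insert r (PySem.Dict.mk (pre ++ suf.map (pvRepl m))) := by
  intro suf
  induction suf with
  | nil =>
    intro d j pre hnd hget hitems _
    simp only [List.append_nil] at hitems
    simp only [List.foldl_nil, List.map_nil, List.append_nil]
    have hmk : PySem.Dict.mk pre = j := by rw [← hitems]
    rw [hmk, pv_insert_eq_self d r j hnd hget]
  | cons hs rest ih =>
    intro d j pre hnd hget hitems hkeys
    obtain ⟨h, s⟩ := hs
    match s with
    | some x =>
      simp only [List.foldl_cons]
      have := ih d j (pre ++ [(h, some x)]) hnd hget (by simpa using hitems)
        (by simpa using hkeys)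
      simpa [pvRepl] using this
    | none =>
      simp only [List.foldl_cons]
      have hcj : j.contains h = true := by
        rw [PySem.Dict.contains_iff_mem_keys]
        have hm : (h, (none : Option String)) ∈ j.items := by
          rw [hitems]; simp
        have := List.mem_map_of_mem (f := fun p : String × Option String => p.1) hm
        simpa [PySem.Dict.keys] using this
      have hgetD : d.getD r PySem.Dict.empty = j := by
        rw [PySem.Dict.getD_eq_get?_getD, hget]; rfl
      have hj' : j.insert h (pvDash m) = PySem.Dict.mk (pre ++ (h, pvDash m) :: rest) := by
        apply PySem.Dict.ext
        rw [PySem.Dict.items_insert_of_contains j (pvDash m) hcj, hitems]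
        exact pv_map_subst pre rest h (pvDash m) none hkeys
      have hstep : pvAssign d r h m = d.insert r (PySem.Dict.mk (pre ++ (h, pvDash m) :: rest)) := by
        rw [pvAssign, hgetD, show (some (String.mk (PySem.List.pyRepeat ['-'] m))) = pvDash m from rfl, hj']
      rw [hstep]
      have hnd' : (d.insert r (PySem.Dict.mk (pre ++ (h, pvDash m) :: rest))).keys.Nodup :=
        PySem.Dict.nodup_keys_insert _ _ _ hnd
      have := ih (d.insert r (PySem.Dict.mk (pre ++ (h, pvDash m) :: rest)))
        (PySem.Dict.mk (pre ++ (h, pvDash m) :: rest)) (pre ++ [(h, pvDash m)]) hnd'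
        (PySem.Dict.get?_insert_self d r _) (by simp) (by simpa [pvDash] using hkeys)
      rw [this, PySem.Dict.insert_insert_self]
      simp [pvRepl]

-- the outer Python loop of A: each region's entry is replaced by its substituted inner dict
theorem pv_outerLoop :
    ∀ (todo : List (String × List (String × Option String)))
      (done : List (String × PySem.Dict String (Option String))),
    ((done.map (fun p => p.1) ++ todo.map (fun p => p.1)).Nodup) →
    (∀ p ∈ todo, (p.2.map (fun q => q.1)).Nodup) →
    ((todo.map (fun p => (p.1, pvM p.2))).foldl
        (fun d rl => (d.getD rl.1 PySem.Dict.empty).items.foldl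
          (fun d hs => match hs.2 with | none => pvAssign d rl.1 hs.1 rl.2 | some _ => d) d)
        (PySem.Dict.mk (done ++ todo.map (fun p => (p.1, PySem.Dict.mk p.2))))).items
      = done ++ todo.map (fun p => (p.1, PySem.Dict.mk (p.2.map (pvRepl (pvM p.2))))) := by
  intro todo
  induction todo with
  | nil => intro done _ _; simp
  | cons p rest ih =>
    intro done hkeys hinner
    have hkeys' : ((done ++ (p.1, PySem.Dict.mk p.2) :: rest.map (fun p => (p.1, PySem.Dict.mk p.2))).map
        (fun q => q.1)).Nodup := by
      simpa [List.map_map, Function.comp] using hkeys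
    have hndD : (PySem.Dict.mk (done ++ (p.1, PySem.Dict.mk p.2) ::
        rest.map (fun p => (p.1, PySem.Dict.mk p.2)))).keys.Nodup := by
      simpa [PySem.Dict.keys] using hkeys'
    have hget : (PySem.Dict.mk (done ++ (p.1, PySem.Dict.mk p.2) ::
        rest.map (fun p => (p.1, PySem.Dict.mk p.2)))).get? p.1 = some (PySem.Dict.mk p.2) :=
      PySem.Dict.get?_of_mem_items _ (by simp) hndD
    have hgetD : (PySem.Dict.mk (done ++ (p.1, PySem.Dict.mk p.2) ::
        rest.map (fun p => (p.1, PySem.Dict.mk p.2)))).getD p.1 PySem.Dict.empty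
        = PySem.Dict.mk p.2 := by
      rw [PySem.Dict.getD_eq_get?_getD, hget]; rfl
    simp only [List.map_cons, List.foldl_cons]
    rw [hgetD]
    rw [pv_innerLoop p.1 (pvM p.2) p.2 _ (PySem.Dict.mk p.2) [] hndD hget rfl
      (by simpa using hinner p (by simp))]
    -- the insert replaces the region's entry in place
    have hc : (PySem.Dict.mk (done ++ (p.1, PySem.Dict.mk p.2) ::
        rest.map (fun p => (p.1, PySem.Dict.mk p.2)))).contains p.1 = true := by
      rw [PySem.Dict.contains_eq_isSome_get?, hget]; rfl
    have hins : (PySem.Dict.mk (done ++ (p.1, PySem.Dict.mk p.2) ::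
          rest.map (fun p => (p.1, PySem.Dict.mk p.2)))).insert p.1
          (PySem.Dict.mk (p.2.map (pvRepl (pvM p.2))))
        = PySem.Dict.mk ((done ++ [(p.1, PySem.Dict.mk (p.2.map (pvRepl (pvM p.2))))]) ++
          rest.map (fun p => (p.1, PySem.Dict.mk p.2))) := by
      apply PySem.Dict.ext
      rw [PySem.Dict.items_insert_of_contains _ _ hc]
      have := pv_map_subst done (rest.map (fun p => (p.1, PySem.Dict.mk p.2))) p.1
        (PySem.Dict.mk (p.2.map (pvRepl (pvM p.2)))) (PySem.Dict.mk p.2) hkeys'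
      simpa using this
    simp only [List.nil_append]
    rw [hins]
    rw [ih (done ++ [(p.1, PySem.Dict.mk (p.2.map (pvRepl (pvM p.2))))])
      (by simpa using hkeys) (fun q hq => hinner q (by simp [hq]))]
    simp

theorem pv_A_eq (dict_in : List (String × List (String × Option String)))
    (h1 : (dict_in.map (fun p => p.1)).Nodup)
    (h2 : ∀ p ∈ dict_in, (p.2.map (fun q => q.1)).Nodup) :
    replace_none_with_max_len dict_in
      = dict_in.map (fun p => (p.1, p.2.map (pvRepl (pvM p.2)))) := by
  unfold replace_none_with_max_len
  have hdml : ((dict_in.map (fun p => (p.1, PySem.Dict.mk p.2))).foldl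
      (fun acc p => acc.insert p.1 (pvSeqMax (p.2.values.filterMap (fun v => v.map PySem.Str.len))))
      PySem.Dict.empty).items = dict_in.map (fun p => (p.1, pvM p.2)) := by
    have hfresh := PySem.Dict.items_foldl_insert_fresh
      (dict_in.map (fun p => (p.1, PySem.Dict.mk p.2))) (fun p => p.1)
      (fun p => pvSeqMax (p.2.values.filterMap (fun v => v.map PySem.Str.len)))
      PySem.Dict.empty (fun a _ => PySem.Dict.contains_empty _)
      (by simpa [List.map_map, Function.comp] using h1)
    rw [hfresh]
    simp only [show PySem.Dict.empty.items = ([] : List (String × Int)) from rfl, List.nil_append, List.map_map]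
    refine List.map_congr_left (fun p _ => ?_)
    simp [Function.comp, pvM, PySem.Dict.values_mk]
  simp only [hdml]
  have hout := pv_outerLoop dict_in [] (by simpa using h1) h2
  simp only [List.nil_append] at hout
  rw [hout]
  simp [List.map_map, Function.comp]

-- ----- B side -----

theorem pv_strLen_nonneg (s : String) : 0 ≤ PySem.Str.len s := by
  simp [PySem.Str.len_eq]

theorem pv_seqMax_append (xs : List Int) (a : Int) (ha : 0 ≤ a) :
    pvSeqMax (xs ++ [a]) = max (pvSeqMax xs) a := by
  cases xs with
  | nil =>
    rw [List.nil_append, show pvSeqMax [a] = a from by simp [pvSeqMax, PySem.List.max?_id_cons],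
      show pvSeqMax [] = 0 from rfl]
    omega
  | cons x t =>
    simp [pvSeqMax, PySem.List.max?_id_cons, List.foldl_append]

theorem pv_M_nonneg (l : List (String × Option String)) : 0 ≤ pvM l := by
  unfold pvM pvSeqMax
  cases h : PySem.List.max? ((l.map (fun q => q.2)).filterMap (fun v => v.map PySem.Str.len)) (fun x => x) with
  | none => simp
  | some m =>
    have hm := PySem.List.max?_mem h
    obtain ⟨o, _, ho⟩ := List.mem_filterMap.mp hm
    obtain ⟨s, rfl, rfl⟩ := Option.map_eq_some_iff.mp ho
    simpa using pv_strLen_nonneg s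

theorem pv_M_append_none (l : List (String × Option String)) (k : String) :
    pvM (l ++ [(k, none)]) = pvM l := by
  simp [pvM]

theorem pv_M_append_some (l : List (String × Option String)) (k : String) (s : String) :
    pvM (l ++ [(k, some s)]) = max (pvM l) (PySem.Str.len s) := by
  unfold pvM
  rw [show ((l ++ [(k, some s)]).map (fun q => q.2)).filterMap (fun v => v.map PySem.Str.len)
      = ((l.map (fun q => q.2)).filterMap (fun v => v.map PySem.Str.len)) ++ [PySem.Str.len s] by simp]
  exact pv_seqMax_append _ _ (pv_strLen_nonneg s)

theorem pv_len_dash (m : Int) (hm : 0 ≤ m) :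
    PySem.Str.len (String.mk (PySem.List.pyRepeat ['-'] m)) = m := by
  simp only [PySem.Str.len_eq, PySem.List.pyRepeat_singleton]
  rw [show (String.mk (List.replicate m.toNat '-')).toList = List.replicate m.toNat '-' from
    Eq.symm (String.ofList_eq.mp rfl), List.length_replicate]
  exact Int.toNat_of_nonneg hm

theorem pv_noneKeys_append (l : List (String × Option String)) (e : String × Option String) :
    pvNoneKeys (l ++ [e]) = pvNoneKeys l ++ (match e.2 with | none => [e.1] | some _ => []) := by
  cases h : e.2 <;> simp [pvNoneKeys, h]

theorem pv_keys_map_repl (l : List (String × Option String)) (m : Int) :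
    (l.map (pvRepl m)).map (fun q => q.1) = l.map (fun q => q.1) := by
  simp [List.map_map, Function.comp, pvRepl]

-- retroactive repair: re-inserting the new dash at every None key of the prefix rewrites the
-- prefix from the old dash form to the new one
theorem pv_repair :
    ∀ (done pre tail : List (String × Option String)) (M M' : Int),
    ((pre ++ done ++ tail).map (fun q => q.1)).Nodup →
    (pvNoneKeys done).foldl (fun r key => r.insert key (some (String.mk (PySem.List.pyRepeat ['-'] M'))))
        (PySem.Dict.mk (pre ++ done.map (pvRepl M) ++ tail))
      = PySem.Dict.mk (pre ++ done.map (pvRepl M') ++ tail) := by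
  intro done
  induction done with
  | nil => intro pre tail M M' _; simp [pvNoneKeys]
  | cons e d' ih =>
    intro pre tail M M' hnd
    obtain ⟨k0, v0⟩ := e
    match v0 with
    | some s0 =>
      have h := ih (pre ++ [(k0, some s0)]) tail M M' (by simpa using hnd)
      simpa [pvNoneKeys, pvRepl] using h
    | none =>
      have hkeys : ((pre ++ ((k0, pvDash M) :: d'.map (pvRepl M) ++ tail)).map (fun q => q.1)).Nodup := by
        have := pv_keys_map_repl d' M
        simp only [List.map_append, List.map_cons] at hnd ⊢
        simpa [this] using hnd
      have hc : (PySem.Dict.mk (pre ++ (k0, pvDash M) :: d'.map (pvRepl M) ++ tail)).contains k0 = true := by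
        rw [PySem.Dict.contains_iff_mem_keys]
        simp [PySem.Dict.keys]
      have hins : (PySem.Dict.mk (pre ++ (k0, pvDash M) :: d'.map (pvRepl M) ++ tail)).insert k0 (some (String.mk (PySem.List.pyRepeat ['-'] M')))
          = PySem.Dict.mk ((pre ++ [(k0, pvDash M')]) ++ d'.map (pvRepl M) ++ tail) := by
        apply PySem.Dict.ext
        rw [PySem.Dict.items_insert_of_contains _ _ hc]
        have := pv_map_subst pre (d'.map (pvRepl M) ++ tail) k0 (pvDash M') (pvDash M)
          (by simpa using hkeys)
        simpa [pvDash] using this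
      have h := ih (pre ++ [(k0, pvDash M')]) tail M M' (by simpa [pvDash] using hnd)
      simp only [pvNoneKeys, List.filterMap_cons, List.foldl_cons]
      show ((d'.filterMap _).foldl (fun r key => r.insert key (some (String.mk (PySem.List.pyRepeat ['-'] M'))))
        ((PySem.Dict.mk (pre ++ ((k0, pvDash M) :: d'.map (pvRepl M)) ++ tail)).insert k0 (some (String.mk (PySem.List.pyRepeat ['-'] M'))))) = _
      rw [show pre ++ ((k0, pvDash M) :: d'.map (pvRepl M)) ++ tail
          = pre ++ (k0, pvDash M) :: d'.map (pvRepl M) ++ tail by simp]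
      rw [hins]
      have h' : (pvNoneKeys d').foldl (fun r key => r.insert key (some (String.mk (PySem.List.pyRepeat ['-'] M'))))
          (PySem.Dict.mk ((pre ++ [(k0, pvDash M')]) ++ d'.map (pvRepl M) ++ tail))
          = PySem.Dict.mk ((pre ++ [(k0, pvDash M')]) ++ d'.map (pvRepl M') ++ tail) := h
      simpa [pvNoneKeys, pvRepl] using h'

-- invariant of B's streaming loop: after a prefix `done`, the region dict is the prefix in its
-- current dash form followed by the untouched rest, the dash is '-'*max(done), and the pending
-- list holds exactly the None keys of the prefix
theorem pv_fill_inv :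
    ∀ (todo done : List (String × Option String)),
    (((done ++ todo).map (fun q => q.1)).Nodup) →
    (todo.foldl pvStep (PySem.Dict.mk (done.map (pvRepl (pvM done)) ++ todo),
        String.mk (PySem.List.pyRepeat ['-'] (pvM done)), pvNoneKeys done)).1.items
      = (done ++ todo).map (pvRepl (pvM (done ++ todo))) := by
  intro todo
  induction todo with
  | nil => intro done _; simp
  | cons kv rest ih =>
    intro done hnd
    obtain ⟨k, v⟩ := kv
    match v with
    | none =>
      -- fill with the current dash, record the key
      simp only [List.foldl_cons, pvStep]
      have hkeys : ((done.map (pvRepl (pvM done)) ++ (k, (none : Option String)) :: rest).map (fun q => q.1)).Nodup := by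
        simp only [List.map_append, List.map_cons] at hnd ⊢
        simpa [pv_keys_map_repl] using hnd
      have hc : (PySem.Dict.mk (done.map (pvRepl (pvM done)) ++ (k, (none : Option String)) :: rest)).contains k = true := by
        rw [PySem.Dict.contains_iff_mem_keys]; simp [PySem.Dict.keys]
      have hins : (PySem.Dict.mk (done.map (pvRepl (pvM done)) ++ (k, (none : Option String)) :: rest)).insert k
            (some (String.mk (PySem.List.pyRepeat ['-'] (pvM done))))
          = PySem.Dict.mk ((done ++ [(k, none)]).map (pvRepl (pvM done)) ++ rest) := by
        apply PySem.Dict.ext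
        rw [PySem.Dict.items_insert_of_contains _ _ hc]
        have := pv_map_subst (done.map (pvRepl (pvM done))) rest k
          (pvDash (pvM done)) (none : Option String) hkeys
        simpa [pvRepl, pvDash] using this
      rw [hins]
      have h := ih (done ++ [(k, none)]) (by simpa using hnd)
      rw [pv_M_append_none] at h
      rw [show pvNoneKeys done ++ [k] = pvNoneKeys (done ++ [(k, none)]) by simp [pv_noneKeys_append]]
      simpa using h
    | some s =>
      simp only [List.foldl_cons, pvStep]
      rw [pv_len_dash (pvM done) (pv_M_nonneg done)]
      by_cases hlt : pvM done < PySem.Str.len s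
      · -- longer value: repair all pending keys with the new dash
        simp only [if_pos hlt]
        have hM' : pvM (done ++ [(k, some s)]) = PySem.Str.len s := by
          rw [pv_M_append_some]; exact max_eq_right hlt.le
        have hrep := pv_repair done [] ((k, some s) :: rest) (pvM done) (PySem.Str.len s)
          (by simpa using hnd)
        simp only [List.nil_append] at hrep
        rw [hrep]
        have h := ih (done ++ [(k, some s)]) (by simpa using hnd)
        rw [hM'] at h
        rw [show pvNoneKeys done = pvNoneKeys (done ++ [(k, some s)]) by simp [pv_noneKeys_append]]
        have hlist : done.map (pvRepl (PySem.Str.len s)) ++ (k, some s) :: rest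
            = (done ++ [(k, some s)]).map (pvRepl (PySem.Str.len s)) ++ rest := by
          simp [pvRepl]
        rw [hlist]
        simpa using h
      · -- not longer: state unchanged, the max is unchanged too
        simp only [if_neg hlt]
        have hM' : pvM (done ++ [(k, some s)]) = pvM done := by
          rw [pv_M_append_some]; exact max_eq_left (le_of_not_gt hlt)
        have h := ih (done ++ [(k, some s)]) (by simpa using hnd)
        rw [hM'] at h
        rw [show pvNoneKeys done = pvNoneKeys (done ++ [(k, some s)]) by simp [pv_noneKeys_append]]
        have hlist : done.map (pvRepl (pvM done)) ++ (k, some s) :: rest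
            = (done ++ [(k, some s)]).map (pvRepl (pvM done)) ++ rest := by
          simp [pvRepl]
        rw [hlist]
        simpa using h

theorem pv_regionFill_eq (items : List (String × Option String))
    (h : (items.map (fun q => q.1)).Nodup) :
    pvRegionFill items = items.map (pvRepl (pvM items)) := by
  have := pv_fill_inv items [] (by simpa using h)
  simpa [pvRegionFill, pvNoneKeys, pvM, pvSeqMax, PySem.List.pyRepeat] using this

theorem pv_B_eq (dict_in : List (String × List (String × Option String)))
    (h2 : ∀ p ∈ dict_in, (p.2.map (fun q => q.1)).Nodup) :
    replace_none_with_max_len_alt dict_in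
      = dict_in.map (fun p => (p.1, p.2.map (pvRepl (pvM p.2)))) := by
  unfold replace_none_with_max_len_alt
  exact List.map_congr_left (fun p hp => by rw [pv_regionFill_eq p.2 (h2 p hp)])

-- ===== VERDICT (by name: the statement is the Claim_ definition above) =====
theorem replace_none_with_max_len_spec : Claim_equal_replace_none_with_max_len := by
  intro dict_in _ hpre
  unfold Spec_replace_none_with_max_len
  rw [pv_A_eq dict_in hpre.1 hpre.2, pv_B_eq dict_in hpre.2]
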